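-- pv_equiv track=rewrite | github.com/remihuguet/aoc2015 | 3/houses.py | _compute_houses
-- ===== SOURCE A (Python) =====
-- def _compute_houses(directions: str):
--     x, y = 0, 0
--     houses = set()
--     for direction in directions:
--         match direction:
--             case '>':
--                 x += 1
--             case '<':
--                 x -= 1
--             case '^':
--                 y += 1
--             case 'v':
--                 y -= 1
--         houses.add((x, y))
--     return houses
-- ===== SOURCE B (Python) =====
-- from itertools import accumulate
--
--
-- def _compute_houses(directions: str):
--     # Per-axis decomposition: project each direction onto x and y deltas,
--     # prefix-sum each axis independently, zip the coordinates back into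
--     # positions, and build the set once.
--     dxs = [1 if c == '>' else -1 if c == '<' else 0 for c in directions]
--     dys = [1 if c == '^' else -1 if c == 'v' else 0 for c in directions]
--     return set(zip(accumulate(dxs), accumulate(dys)))
-- ===== Notes on version B (the rewrite author's own statement) =====
-- stated objective: alternative
-- what changed: Decomposes the walk per axis: two delta-projection passes map the string to x- and y-delta lists, each axis is prefix-summed independently with accumulate, and the coordinate streams are zipped into positions and collected into a set once, instead of A's single loop mutating a combined (x,y) state and adding to the set per step.
import Mathlib
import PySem

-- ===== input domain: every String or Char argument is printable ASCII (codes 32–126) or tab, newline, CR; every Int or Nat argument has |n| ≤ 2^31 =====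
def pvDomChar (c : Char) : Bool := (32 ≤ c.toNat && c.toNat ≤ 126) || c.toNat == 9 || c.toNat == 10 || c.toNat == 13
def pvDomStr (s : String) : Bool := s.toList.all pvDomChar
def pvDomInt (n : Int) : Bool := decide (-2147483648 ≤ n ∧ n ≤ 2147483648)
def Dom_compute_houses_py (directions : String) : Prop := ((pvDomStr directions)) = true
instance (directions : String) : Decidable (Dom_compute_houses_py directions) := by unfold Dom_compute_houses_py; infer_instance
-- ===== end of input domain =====

-- B decomposes the walk per axis: two delta-projection passes, an independent prefix sum
-- per coordinate, then zip + one set construction (objective: alternative; same cost).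

-- ===== PORT A =====
-- literal port of A's loop: state (x, y, houses), branch per character, add after each step
def compute_houses_py (directions : String) : List (Int × Int) :=
  (directions.toList.foldl
    (fun (st : Int × Int × PySem.Set (Int × Int)) direction =>
      let x := st.1
      let y := st.2.1
      let houses := st.2.2
      let p : Int × Int :=
        if direction = '>' then (x + 1, y)
        else if direction = '<' then (x - 1, y)
        else if direction = '^' then (x, y + 1)
        else if direction = 'v' then (x, y - 1)
        else (x, y)
      (p.1, p.2, PySem.Set.add houses p))
    (0, 0, PySem.Set.empty)).2.2

-- ===== PORT B =====
-- itertools.accumulate (default op), generalized over the running total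
def pvAccumulate (acc : Int) : List Int → List Int
  | [] => []
  | a :: as => (acc + a) :: pvAccumulate (acc + a) as

def compute_houses_py_alt (directions : String) : List (Int × Int) :=
  let dxs := directions.toList.map (fun c => if c = '>' then (1 : Int) else if c = '<' then -1 else 0)
  let dys := directions.toList.map (fun c => if c = '^' then (1 : Int) else if c = 'v' then -1 else 0)
  PySem.Set.ofList (List.zip (pvAccumulate 0 dxs) (pvAccumulate 0 dys))

-- ===== PRECONDITION & SPEC =====
def Spec_compute_houses_py (directions : String) (out : List (Int × Int)) : Prop := out = compute_houses_py_alt directions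
instance (directions : String) (out : List (Int × Int)) : Decidable (Spec_compute_houses_py directions out) := by unfold Spec_compute_houses_py; infer_instance

-- ===== CLAIM (what is proved, stated in full; the proofs are below) =====
def Claim_equal_compute_houses_py : Prop := ∀ (directions : String), Dom_compute_houses_py directions → Spec_compute_houses_py directions (compute_houses_py directions)

-- ===== LEMMAS AND PROOFS =====

-- loop invariant: A's fold from state (x, y, s) equals folding Set.add over the zipped
-- per-axis prefix sums started at x and y
lemma fold_eq (ds : List Char) (x y : Int) (s : PySem.Set (Int × Int)) :
    (ds.foldl
      (fun (st : Int × Int × PySem.Set (Int × Int)) direction =>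
        let x := st.1
        let y := st.2.1
        let houses := st.2.2
        let p : Int × Int :=
          if direction = '>' then (x + 1, y)
          else if direction = '<' then (x - 1, y)
          else if direction = '^' then (x, y + 1)
          else if direction = 'v' then (x, y - 1)
          else (x, y)
        (p.1, p.2, PySem.Set.add houses p))
      (x, y, s)).2.2
    = (List.zip
        (pvAccumulate x (ds.map (fun c => if c = '>' then (1 : Int) else if c = '<' then -1 else 0)))
        (pvAccumulate y (ds.map (fun c => if c = '^' then (1 : Int) else if c = 'v' then -1 else 0)))).foldl
        PySem.Set.add s := by
  induction ds generalizing x y s with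
  | nil => rfl
  | cons d ds ih =>
    simp only [List.foldl_cons, List.map_cons, pvAccumulate, List.zip_cons_cons]
    by_cases h1 : d = '>'
    · subst h1; simpa using ih (x + 1) y _
    by_cases h2 : d = '<'
    · subst h2; simpa [sub_eq_add_neg] using ih (x - 1) y _
    by_cases h3 : d = '^'
    · subst h3; simpa using ih x (y + 1) _
    by_cases h4 : d = 'v'
    · subst h4; simpa [sub_eq_add_neg] using ih x (y - 1) _
    · simp only [if_neg h1, if_neg h2, if_neg h3, if_neg h4, add_zero]
      exact ih x y _

-- ===== VERDICT (by name: the statement is the Claim_ definition above) =====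
theorem compute_houses_py_spec : Claim_equal_compute_houses_py := by
  intro directions _
  show _ = _
  rw [compute_houses_py, compute_houses_py_alt, PySem.Set.ofList_eq_foldl]
  exact fold_eq directions.toList 0 0 PySem.Set.empty
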